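-- pv_equiv track=rewrite | github.com/rodriguezmatirp/Lab-Main | Sem 4/Py_Lab/Ps_1/six.py | metathesis_pair
-- ===== SOURCE A (Python) =====
-- def metathesis_pair(word_1,word_2):
--     char_list_1 = []
--     char_list_2 = []
--     if len(word_1) != len(word_2):
--         return False
--     for x in range(len(word_1)):
--         if word_1[x] != word_2[x]:
--             char_list_1.append(word_1[x])
--             char_list_2.append(word_2[x])
--     if len(char_list_2) == len(char_list_1) and len(char_list_1) ==2 and set(char_list_1) == set(char_list_2):
--         return True
--     return False
-- ===== SOURCE B (Python) =====
-- def metathesis_pair(word_1, word_2):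
--     if len(word_1) != len(word_2):
--         return False
--     diffs = sum(1 for a, b in zip(word_1, word_2) if a != b)
--     return diffs == 2 and sorted(word_1) == sorted(word_2)
-- ===== Notes on version B (the rewrite author's own statement) =====
-- stated objective: alternative
-- what changed: Instead of collecting the mismatched characters of both words into two lists and comparing their sets, B counts the differing positions in one zip pass and checks the anagram property by comparing sorted(word_1) with sorted(word_2); the pair is a metathesis pair iff the words are anagrams differing in exactly two positions.
import Mathlib
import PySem

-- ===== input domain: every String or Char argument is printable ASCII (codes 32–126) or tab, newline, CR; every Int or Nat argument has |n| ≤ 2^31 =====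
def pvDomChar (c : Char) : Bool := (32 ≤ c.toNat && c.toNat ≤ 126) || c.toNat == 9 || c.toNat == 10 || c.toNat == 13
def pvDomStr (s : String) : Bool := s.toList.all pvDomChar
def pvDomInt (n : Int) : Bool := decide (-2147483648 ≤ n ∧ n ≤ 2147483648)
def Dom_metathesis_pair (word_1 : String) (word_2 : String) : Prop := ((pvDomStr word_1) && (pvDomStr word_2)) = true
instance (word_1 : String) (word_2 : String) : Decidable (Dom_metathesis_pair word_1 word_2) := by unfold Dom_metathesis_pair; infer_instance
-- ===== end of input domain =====

-- B replaces A's two collected mismatch lists and their set comparison by a one-pass mismatch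
-- count over zip plus an anagram check via sorted-list equality (an alternative decomposition).


-- ===== PORT A =====
def metathesis_pair (word_1 : String) (word_2 : String) : Bool :=
  let l1 := word_1.toList
  let l2 := word_2.toList
  let char_list_1 : List Char := []
  let char_list_2 : List Char := []
  if l1.length ≠ l2.length then
    false
  else
    let p := (PySem.List.pyRange 0 (l1.length : Int) 1).foldl
      (fun (acc : List Char × List Char) x =>
        if PySem.List.pyGetD l1 x ' ' ≠ PySem.List.pyGetD l2 x ' ' then
          (acc.1 ++ [PySem.List.pyGetD l1 x ' '], acc.2 ++ [PySem.List.pyGetD l2 x ' '])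
        else acc) (char_list_1, char_list_2)
    if p.2.length = p.1.length ∧ p.1.length = 2 ∧
        PySem.Set.equal (PySem.Set.ofList p.1) (PySem.Set.ofList p.2) then
      true
    else
      false

-- ===== PORT B =====
def metathesis_pair_alt (word_1 : String) (word_2 : String) : Bool :=
  let l1 := word_1.toList
  let l2 := word_2.toList
  if l1.length ≠ l2.length then
    false
  else
    let diffs := (l1.zip l2).countP (fun p => p.1 != p.2)
    diffs == 2 && PySem.List.sorted l1 (fun x => x) false == PySem.List.sorted l2 (fun x => x) false

-- ===== PRECONDITION & SPEC =====
def Spec_metathesis_pair (word_1 : String) (word_2 : String) (out : Bool) : Prop := out = metathesis_pair_alt word_1 word_2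
instance (word_1 : String) (word_2 : String) (out : Bool) : Decidable (Spec_metathesis_pair word_1 word_2 out) := by unfold Spec_metathesis_pair; infer_instance

-- ===== CLAIM (what is proved, stated in full; the proofs are below) =====
def Claim_equal_metathesis_pair : Prop := ∀ (word_1 : String) (word_2 : String), Dom_metathesis_pair word_1 word_2 → Spec_metathesis_pair word_1 word_2 (metathesis_pair word_1 word_2)

-- ===== LEMMAS AND PROOFS =====

theorem pv_loop_eq (l1 : List Char) : ∀ (l2 a b : List Char), l1.length = l2.length →
    ((List.range l1.length).foldl
      (fun (acc : List Char × List Char) i =>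
        if l1.getD i ' ' ≠ l2.getD i ' ' then
          (acc.1 ++ [l1.getD i ' '], acc.2 ++ [l2.getD i ' '])
        else acc) (a, b))
    = (a ++ ((l1.zip l2).filter (fun p => p.1 != p.2)).map Prod.fst,
       b ++ ((l1.zip l2).filter (fun p => p.1 != p.2)).map Prod.snd) := by
  induction l1 with
  | nil => intro l2 a b h; simp
  | cons c t ih =>
    intro l2 a b h
    cases l2 with
    | nil => simp at h
    | cons d t2 =>
      simp only [List.length_cons, List.range_succ_eq_map, List.foldl_cons, List.foldl_map]
      have hfun : (fun (acc : List Char × List Char) (i : Nat) =>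
          if (c :: t).getD (i+1) ' ' ≠ (d :: t2).getD (i+1) ' ' then
            (acc.1 ++ [(c :: t).getD (i+1) ' '], acc.2 ++ [(d :: t2).getD (i+1) ' '])
          else acc)
          = (fun (acc : List Char × List Char) i =>
          if t.getD i ' ' ≠ t2.getD i ' ' then
            (acc.1 ++ [t.getD i ' '], acc.2 ++ [t2.getD i ' '])
          else acc) := by
        funext acc i; simp
      rw [hfun]
      have ht : t.length = t2.length := by simpa using h
      by_cases hcd : c = d
      · subst hcd
        rw [show (if (c :: t).getD 0 ' ' ≠ (c :: t2).getD 0 ' ' then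
            ((a:List Char) ++ [(c :: t).getD 0 ' '], (b:List Char) ++ [(c :: t2).getD 0 ' '])
          else (a, b)) = (a, b) by simp]
        rw [ih t2 a b ht]
        simp
      · rw [show (if (c :: t).getD 0 ' ' ≠ (d :: t2).getD 0 ' ' then
            ((a:List Char) ++ [(c :: t).getD 0 ' '], (b:List Char) ++ [(d :: t2).getD 0 ' '])
          else (a, b)) = (a ++ [c], b ++ [d]) by simp [hcd]]
        rw [ih t2 (a ++ [c]) (b ++ [d]) ht]
        simp [hcd]

theorem pv_decomp (l1 : List Char) : ∀ (l2 : List Char), l1.length = l2.length →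
    ∃ m : Multiset Char,
      (l1 : Multiset Char) = m + ↑(((l1.zip l2).filter (fun p => p.1 != p.2)).map Prod.fst) ∧
      (l2 : Multiset Char) = m + ↑(((l1.zip l2).filter (fun p => p.1 != p.2)).map Prod.snd) := by
  induction l1 with
  | nil =>
    intro l2 h
    have : l2 = [] := List.eq_nil_of_length_eq_zero (by simpa using h.symm)
    subst this; exact ⟨0, by simp⟩
  | cons c t ih =>
    intro l2 h
    cases l2 with
    | nil => simp at h
    | cons d t2 =>
      obtain ⟨m, h1, h2⟩ := ih t2 (by simpa using h)
      by_cases hcd : c = d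
      · subst hcd
        refine ⟨c ::ₘ m, ?_, ?_⟩ <;>
          simp [← Multiset.cons_coe, h1, h2, Multiset.cons_add]
      · refine ⟨m, ?_, ?_⟩ <;>
          simp [hcd, ← Multiset.cons_coe, h1, h2, Multiset.add_cons]

theorem pv_perm_iff (l1 l2 : List Char) (h : l1.length = l2.length) :
    (l1.Perm l2) ↔
      (((l1.zip l2).filter (fun p => p.1 != p.2)).map Prod.fst).Perm
        (((l1.zip l2).filter (fun p => p.1 != p.2)).map Prod.snd) := by
  obtain ⟨m, h1, h2⟩ := pv_decomp l1 l2 h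
  rw [← Multiset.coe_eq_coe, ← Multiset.coe_eq_coe, h1, h2]
  exact Multiset.add_right_inj

theorem pv_two_iff (D : List (Char × Char)) (hlen : D.length = 2)
    (hne : ∀ p ∈ D, p.1 ≠ p.2) :
    (PySem.Set.equal (PySem.Set.ofList (D.map Prod.fst)) (PySem.Set.ofList (D.map Prod.snd)) = true)
      ↔ (D.map Prod.fst).Perm (D.map Prod.snd) := by
  obtain ⟨p, q, rfl⟩ := List.length_eq_two.mp hlen
  obtain ⟨a, b⟩ := p
  obtain ⟨c, d⟩ := q
  have hab : a ≠ b := hne (a, b) (by simp)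
  have hcd : c ≠ d := hne (c, d) (by simp)
  simp only [List.map_cons, List.map_nil]
  have h1 : (PySem.Set.equal (PySem.Set.ofList [a, c]) (PySem.Set.ofList [b, d]) = true)
      ↔ (a = d ∧ c = b) := by
    rw [PySem.Set.equal_iff]
    constructor
    · intro hx
      have ha := (hx a).mp (by simp [PySem.Set.mem_ofList])
      have hc := (hx c).mp (by simp [PySem.Set.mem_ofList])
      simp [PySem.Set.mem_ofList] at ha hc
      exact ⟨ha.resolve_left hab, hc.resolve_right hcd⟩
    · rintro ⟨rfl, rfl⟩
      intro x
      simp [PySem.Set.mem_ofList]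
      tauto
  have h2 : ([a, c].Perm [b, d]) ↔ (a = d ∧ c = b) := by
    constructor
    · intro hp
      have ha : a = b ∨ a = d := by
        have := hp.subset (show a ∈ [a, c] by simp)
        simpa using this
      have had : a = d := ha.resolve_left hab
      subst had
      have : [c].Perm [b] := (List.perm_cons a).mp (hp.trans (List.Perm.swap a b []))
      exact ⟨rfl, List.singleton_perm_singleton.mp this⟩
    · rintro ⟨rfl, rfl⟩
      exact List.Perm.swap c a []
  rw [h1, h2]

-- core equality on the list level, lengths equal
theorem pv_core (l1 l2 : List Char) (hl : l1.length = l2.length) :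
    (let p := (PySem.List.pyRange 0 (l1.length : Int) 1).foldl
      (fun (acc : List Char × List Char) x =>
        if PySem.List.pyGetD l1 x ' ' ≠ PySem.List.pyGetD l2 x ' ' then
          (acc.1 ++ [PySem.List.pyGetD l1 x ' '], acc.2 ++ [PySem.List.pyGetD l2 x ' '])
        else acc) (([] : List Char), ([] : List Char))
     if p.2.length = p.1.length ∧ p.1.length = 2 ∧
        PySem.Set.equal (PySem.Set.ofList p.1) (PySem.Set.ofList p.2) then true else false)
    = ((l1.zip l2).countP (fun p => p.1 != p.2) == 2
        && (PySem.List.sorted l1 (fun x => x) false == PySem.List.sorted l2 (fun x => x) false)) := by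
  have hrange : PySem.List.pyRange 0 (l1.length : Int) 1 = (List.range l1.length).map (Nat.cast) :=
    PySem.List.pyRange_zero_natCast l1.length
  rw [hrange, List.foldl_map]
  have hfun : (fun (acc : List Char × List Char) (i : Nat) =>
      if PySem.List.pyGetD l1 (i : Int) ' ' ≠ PySem.List.pyGetD l2 (i : Int) ' ' then
        (acc.1 ++ [PySem.List.pyGetD l1 (i : Int) ' '], acc.2 ++ [PySem.List.pyGetD l2 (i : Int) ' '])
      else acc)
      = (fun (acc : List Char × List Char) i =>
      if l1.getD i ' ' ≠ l2.getD i ' ' then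
        (acc.1 ++ [l1.getD i ' '], acc.2 ++ [l2.getD i ' '])
      else acc) := by
    funext acc i
    rw [PySem.List.pyGetD_natCast, PySem.List.pyGetD_natCast]
  rw [hfun, pv_loop_eq l1 l2 [] [] hl]
  simp only [List.nil_append, List.length_map]
  obtain ⟨D, hD⟩ : ∃ D, D = (l1.zip l2).filter (fun p => p.1 != p.2) := ⟨_, rfl⟩
  rw [← hD]
  have hne : ∀ p ∈ D, p.1 ≠ p.2 := by
    intro p hp
    rw [hD] at hp
    have := (List.mem_filter.mp hp).2
    simpa using this
  rw [List.countP_eq_length_filter]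
  by_cases h2 : D.length = 2
  · have hiff : (PySem.Set.equal (PySem.Set.ofList (D.map Prod.fst)) (PySem.Set.ofList (D.map Prod.snd)) = true)
        ↔ ((PySem.List.sorted l1 (fun x => x) false) = (PySem.List.sorted l2 (fun x => x) false)) := by
      rw [pv_two_iff D h2 hne, PySem.List.sorted_id_eq_sorted_id_iff_perm l1 l2]
      rw [hD]
      exact (pv_perm_iff l1 l2 hl).symm
    by_cases hs : PySem.Set.equal (PySem.Set.ofList (D.map Prod.fst)) (PySem.Set.ofList (D.map Prod.snd)) = true
    · simp [← hD, h2, hs, hiff.mp hs]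
    · have : ¬ ((PySem.List.sorted l1 (fun x => x) false) = (PySem.List.sorted l2 (fun x => x) false)) :=
        fun he => hs (hiff.mpr he)
      simp [← hD, h2, hs, this]
  · simp [← hD, h2]

-- ===== VERDICT (by name: the statement is the Claim_ definition above) =====
theorem metathesis_pair_spec : Claim_equal_metathesis_pair := by
  intro w1 w2 _
  show metathesis_pair w1 w2 = metathesis_pair_alt w1 w2
  simp only [metathesis_pair, metathesis_pair_alt]
  by_cases hl : w1.toList.length = w2.toList.length
  · rw [if_neg (not_not_intro hl), if_neg (not_not_intro hl)]
    exact pv_core w1.toList w2.toList hl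
  · rw [if_pos hl, if_pos hl]
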